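-- pv_equiv track=rewrite | github.com/MNS-Vic/marketprism | config/factory/validators/schema_validator.py | _infer_schema_name
-- ===== SOURCE A (Python) =====
-- from typing import Dict, Any, Optional, List
--
-- def _infer_schema_name(config: Dict[str, Any]) -> Optional[str]:
--     """从配置推断模式名称"""
--     # 检查配置中是否有明确的模式指定
--     if 'schema' in config:
--         return config['schema']
--
--     # 根据配置结构推断
--     if 'service' in config:
--         return 'service-schema'
--     elif 'database' in config or any(db in config for db in ['redis', 'clickhouse', 'postgresql']):
--         return 'database-schema'
--     elif 'monitoring' in config or 'prometheus' in config or 'grafana' in config: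
--         return 'monitoring-schema'
--     elif 'security' in config or 'auth' in config:
--         return 'security-schema'
--
--     return None
-- ===== SOURCE B (Python) =====
-- from typing import Dict, Any, Optional, List
--
-- # Priority of each recognized key (lower wins); 5 = unrecognized.
-- _PRIORITY = {
--     'schema': 0,
--     'service': 1,
--     'database': 2, 'redis': 2, 'clickhouse': 2, 'postgresql': 2,
--     'monitoring': 3, 'prometheus': 3, 'grafana': 3,
--     'security': 4, 'auth': 4,
-- }
--
-- _NAMES = {1: 'service-schema', 2: 'database-schema',
--           3: 'monitoring-schema', 4: 'security-schema'}
--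
-- def _infer_schema_name(config: Dict[str, Any]) -> Optional[str]:
--     # Single pass over the config keys: keep the best (lowest) priority seen.
--     best = 5
--     for k in config:
--         best = min(best, _PRIORITY.get(k, 5))
--     if best == 0:
--         return config['schema']
--     return _NAMES.get(best)
-- ===== Notes on version B (the rewrite author's own statement) =====
-- stated objective: alternative
-- what changed: Instead of A's chain of per-rule membership tests that each scan the config, B makes a single pass over the config keys, mapping each key through a key-to-priority table and keeping the minimum priority, then converts the best priority to the schema name (0 = the stored 'schema' value).
import Mathlib
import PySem

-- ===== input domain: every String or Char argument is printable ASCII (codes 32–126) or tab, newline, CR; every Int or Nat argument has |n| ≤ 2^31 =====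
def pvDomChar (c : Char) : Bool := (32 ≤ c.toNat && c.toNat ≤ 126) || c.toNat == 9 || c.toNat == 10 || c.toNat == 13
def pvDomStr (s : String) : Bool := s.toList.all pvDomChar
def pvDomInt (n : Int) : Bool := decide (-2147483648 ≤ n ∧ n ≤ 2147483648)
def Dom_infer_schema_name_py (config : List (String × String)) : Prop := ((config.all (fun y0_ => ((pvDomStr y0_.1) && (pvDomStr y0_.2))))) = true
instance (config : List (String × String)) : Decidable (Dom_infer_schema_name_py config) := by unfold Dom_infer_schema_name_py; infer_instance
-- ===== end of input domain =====

-- B replaces A's chain of per-rule membership tests (each scanning the config) by a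
-- single pass over the config keys keeping the minimum priority from a key->priority
-- table, then mapping the best priority to the schema name (objective: alternative).


-- ===== PORT A =====
-- 'k in config' = some pair has key k; 'config[k]' = value of the first pair with key k
def pvHasKey (config : List (String × String)) (k : String) : Bool :=
  config.any (fun p => p.1 == k)

def pvGetKey (config : List (String × String)) (k : String) : Option String :=
  (config.find? (fun p => p.1 == k)).map (·.2)

def infer_schema_name_py (config : List (String × String)) : Option String :=
  if pvHasKey config "schema" then
    pvGetKey config "schema"
  else if pvHasKey config "service" then
    some "service-schema"
  else if pvHasKey config "database" ||
          (["redis", "clickhouse", "postgresql"].any (fun db => pvHasKey config db)) then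
    some "database-schema"
  else if pvHasKey config "monitoring" || pvHasKey config "prometheus" || pvHasKey config "grafana" then
    some "monitoring-schema"
  else if pvHasKey config "security" || pvHasKey config "auth" then
    some "security-schema"
  else
    none

-- ===== PORT B =====
-- the _PRIORITY table of Source B (dict literal as an association list)
def pvPriority : List (String × Nat) :=
  [("schema", 0), ("service", 1),
   ("database", 2), ("redis", 2), ("clickhouse", 2), ("postgresql", 2),
   ("monitoring", 3), ("prometheus", 3), ("grafana", 3),
   ("security", 4), ("auth", 4)]

-- the _NAMES table of Source B
def pvNames : List (Nat × String) :=
  [(1, "service-schema"), (2, "database-schema"),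
   (3, "monitoring-schema"), (4, "security-schema")]

-- d.get(k, dflt) on an association list (first match)
def pvLookupD (d : List (String × Nat)) (k : String) (dflt : Nat) : Nat :=
  ((d.find? (fun p => p.1 == k)).map (·.2)).getD dflt

-- d.get(k) on an association list (first match, None when absent)
def pvLookup? (d : List (Nat × String)) (k : Nat) : Option String :=
  (d.find? (fun p => p.1 == k)).map (·.2)

def infer_schema_name_py_alt (config : List (String × String)) : Option String :=
  let best := config.foldl (fun b p => min b (pvLookupD pvPriority p.1 5)) 5
  if best == 0 then
    pvGetKey config "schema"
  else
    pvLookup? pvNames best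

-- ===== PRECONDITION & SPEC =====
def Spec_infer_schema_name_py (config : List (String × String)) (out : Option String) : Prop := out = infer_schema_name_py_alt config
instance (config : List (String × String)) (out : Option String) : Decidable (Spec_infer_schema_name_py config out) := by unfold Spec_infer_schema_name_py; infer_instance

-- ===== CLAIM (what is proved, stated in full; the proofs are below) =====
def Claim_equal_infer_schema_name_py : Prop := ∀ (config : List (String × String)), Dom_infer_schema_name_py config → Spec_infer_schema_name_py config (infer_schema_name_py config)

-- ===== LEMMAS AND PROOFS =====

-- the value of B's running minimum, written as A's membership if-chain
def pvChain (config : List (String × String)) : Nat :=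
  if pvHasKey config "schema" then 0
  else if pvHasKey config "service" then 1
  else if pvHasKey config "database" || pvHasKey config "redis" ||
          pvHasKey config "clickhouse" || pvHasKey config "postgresql" then 2
  else if pvHasKey config "monitoring" || pvHasKey config "prometheus" ||
          pvHasKey config "grafana" then 3
  else if pvHasKey config "security" || pvHasKey config "auth" then 4
  else 5

lemma pvFoldl_min_shift (l : List (String × String)) (a : Nat) (ha : a ≤ 5) :
    l.foldl (fun b p => min b (pvLookupD pvPriority p.1 5)) a
      = min a (l.foldl (fun b p => min b (pvLookupD pvPriority p.1 5)) 5) := by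
  induction l generalizing a with
  | nil => simp only [List.foldl]; omega
  | cons p l ih =>
      simp only [List.foldl]
      rw [ih _ (by omega), ih (min 5 _) (by omega)]
      omega

set_option maxHeartbeats 1000000 in
lemma pvMin_lookup_chain (p : String × String) (l : List (String × String)) :
    min (pvLookupD pvPriority p.1 5) (pvChain l) = pvChain (p :: l) := by
  have hc5 : pvChain l ≤ 5 := by unfold pvChain; split_ifs <;> omega
  by_cases h0 : p.1 = "schema"
  · simp only [pvLookupD, pvPriority, pvChain, pvHasKey, List.any_cons, List.find?, h0]
    simp only [String.reduceBEq, Bool.false_or, Bool.true_or, Bool.or_true, reduceIte, Option.map_some, Option.getD_some, reduceCtorEq]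
    split_ifs <;> omega
  by_cases h1 : p.1 = "service"
  · simp only [pvLookupD, pvPriority, pvChain, pvHasKey, List.any_cons, List.find?, h1]
    simp only [String.reduceBEq, Bool.false_or, Bool.true_or, Bool.or_true, reduceIte, Option.map_some, Option.getD_some, reduceCtorEq]
    split_ifs <;> omega
  by_cases h2 : p.1 = "database"
  · simp only [pvLookupD, pvPriority, pvChain, pvHasKey, List.any_cons, List.find?, h2]
    simp only [String.reduceBEq, Bool.false_or, Bool.true_or, Bool.or_true, reduceIte, Option.map_some, Option.getD_some, reduceCtorEq]
    split_ifs <;> omega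
  by_cases h3 : p.1 = "redis"
  · simp only [pvLookupD, pvPriority, pvChain, pvHasKey, List.any_cons, List.find?, h3]
    simp only [String.reduceBEq, Bool.false_or, Bool.true_or, Bool.or_true, reduceIte, Option.map_some, Option.getD_some, reduceCtorEq]
    split_ifs <;> omega
  by_cases h4 : p.1 = "clickhouse"
  · simp only [pvLookupD, pvPriority, pvChain, pvHasKey, List.any_cons, List.find?, h4]
    simp only [String.reduceBEq, Bool.false_or, Bool.true_or, Bool.or_true, reduceIte, Option.map_some, Option.getD_some, reduceCtorEq]
    split_ifs <;> omega
  by_cases h5 : p.1 = "postgresql"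
  · simp only [pvLookupD, pvPriority, pvChain, pvHasKey, List.any_cons, List.find?, h5]
    simp only [String.reduceBEq, Bool.false_or, Bool.true_or, Bool.or_true, reduceIte, Option.map_some, Option.getD_some, reduceCtorEq]
    split_ifs <;> omega
  by_cases h6 : p.1 = "monitoring"
  · simp only [pvLookupD, pvPriority, pvChain, pvHasKey, List.any_cons, List.find?, h6]
    simp only [String.reduceBEq, Bool.false_or, Bool.true_or, Bool.or_true, reduceIte, Option.map_some, Option.getD_some, reduceCtorEq]
    split_ifs <;> omega
  by_cases h7 : p.1 = "prometheus"
  · simp only [pvLookupD, pvPriority, pvChain, pvHasKey, List.any_cons, List.find?, h7]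
    simp only [String.reduceBEq, Bool.false_or, Bool.true_or, Bool.or_true, reduceIte, Option.map_some, Option.getD_some, reduceCtorEq]
    split_ifs <;> omega
  by_cases h8 : p.1 = "grafana"
  · simp only [pvLookupD, pvPriority, pvChain, pvHasKey, List.any_cons, List.find?, h8]
    simp only [String.reduceBEq, Bool.false_or, Bool.true_or, Bool.or_true, reduceIte, Option.map_some, Option.getD_some, reduceCtorEq]
    split_ifs <;> omega
  by_cases h9 : p.1 = "security"
  · simp only [pvLookupD, pvPriority, pvChain, pvHasKey, List.any_cons, List.find?, h9]
    simp only [String.reduceBEq, Bool.false_or, Bool.true_or, Bool.or_true, reduceIte, Option.map_some, Option.getD_some, reduceCtorEq]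
    split_ifs <;> omega
  by_cases h10 : p.1 = "auth"
  · simp only [pvLookupD, pvPriority, pvChain, pvHasKey, List.any_cons, List.find?, h10]
    simp only [String.reduceBEq, Bool.false_or, Bool.true_or, Bool.or_true, reduceIte, Option.map_some, Option.getD_some, reduceCtorEq]
    split_ifs <;> omega
  have g0 : ("schema" == p.1) = false := beq_eq_false_iff_ne.mpr (Ne.symm h0)
  have g0' : (p.1 == "schema") = false := beq_eq_false_iff_ne.mpr h0
  have g1 : ("service" == p.1) = false := beq_eq_false_iff_ne.mpr (Ne.symm h1)
  have g1' : (p.1 == "service") = false := beq_eq_false_iff_ne.mpr h1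
  have g2 : ("database" == p.1) = false := beq_eq_false_iff_ne.mpr (Ne.symm h2)
  have g2' : (p.1 == "database") = false := beq_eq_false_iff_ne.mpr h2
  have g3 : ("redis" == p.1) = false := beq_eq_false_iff_ne.mpr (Ne.symm h3)
  have g3' : (p.1 == "redis") = false := beq_eq_false_iff_ne.mpr h3
  have g4 : ("clickhouse" == p.1) = false := beq_eq_false_iff_ne.mpr (Ne.symm h4)
  have g4' : (p.1 == "clickhouse") = false := beq_eq_false_iff_ne.mpr h4
  have g5 : ("postgresql" == p.1) = false := beq_eq_false_iff_ne.mpr (Ne.symm h5)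
  have g5' : (p.1 == "postgresql") = false := beq_eq_false_iff_ne.mpr h5
  have g6 : ("monitoring" == p.1) = false := beq_eq_false_iff_ne.mpr (Ne.symm h6)
  have g6' : (p.1 == "monitoring") = false := beq_eq_false_iff_ne.mpr h6
  have g7 : ("prometheus" == p.1) = false := beq_eq_false_iff_ne.mpr (Ne.symm h7)
  have g7' : (p.1 == "prometheus") = false := beq_eq_false_iff_ne.mpr h7
  have g8 : ("grafana" == p.1) = false := beq_eq_false_iff_ne.mpr (Ne.symm h8)
  have g8' : (p.1 == "grafana") = false := beq_eq_false_iff_ne.mpr h8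
  have g9 : ("security" == p.1) = false := beq_eq_false_iff_ne.mpr (Ne.symm h9)
  have g9' : (p.1 == "security") = false := beq_eq_false_iff_ne.mpr h9
  have g10 : ("auth" == p.1) = false := beq_eq_false_iff_ne.mpr (Ne.symm h10)
  have g10' : (p.1 == "auth") = false := beq_eq_false_iff_ne.mpr h10
  have hq : pvLookupD pvPriority p.1 5 = 5 := by
    simp only [pvLookupD, pvPriority, List.find?, g0, g1, g2, g3, g4, g5, g6, g7, g8, g9, g10, Option.map_none, Option.getD_none]
  have hr : pvChain (p :: l) = pvChain l := by
    simp only [pvChain, pvHasKey, List.any_cons, g0', g1', g2', g3', g4', g5', g6', g7', g8', g9', g10', Bool.false_or]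
    rfl
  rw [hq, hr]
  omega

lemma pvLookupD_le (s : String) : pvLookupD pvPriority s 5 ≤ 5 := by
  unfold pvLookupD
  cases h : pvPriority.find? (fun p => p.1 == s) with
  | none => simp
  | some x =>
      have hx := List.mem_of_find?_eq_some h
      fin_cases hx <;> simp

lemma pvBest_eq_chain (config : List (String × String)) :
    config.foldl (fun b p => min b (pvLookupD pvPriority p.1 5)) 5 = pvChain config := by
  induction config with
  | nil => simp [pvChain, pvHasKey]
  | cons p l ih =>
      simp only [List.foldl]
      rw [pvFoldl_min_shift _ _ (by omega), ih]
      have hle := pvLookupD_le p.1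
      rw [show min 5 (pvLookupD pvPriority p.1 5) = pvLookupD pvPriority p.1 5 by omega]
      exact pvMin_lookup_chain p l

-- ===== VERDICT (by name: the statement is the Claim_ definition above) =====
theorem infer_schema_name_py_spec : Claim_equal_infer_schema_name_py := by
  intro config _
  unfold Spec_infer_schema_name_py infer_schema_name_py infer_schema_name_py_alt
  rw [pvBest_eq_chain]
  unfold pvChain
  by_cases h0 : pvHasKey config "schema" = true
  · simp [h0]
  by_cases h1 : pvHasKey config "service" = true
  · simp [h0, h1, pvLookup?, pvNames]
  by_cases h2 : (pvHasKey config "database" || pvHasKey config "redis" ||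
      pvHasKey config "clickhouse" || pvHasKey config "postgresql") = true
  · simp only [Bool.or_eq_true, List.any_cons, List.any_nil, Bool.or_false] at h2 ⊢
    simp [h0, h1, h2, pvLookup?, pvNames]
    intros; simp_all
  · simp only [Bool.or_eq_true, not_or, Bool.not_eq_true] at h2
    obtain ⟨⟨⟨hdb, hrd⟩, hch⟩, hpg⟩ := h2
    by_cases h3 : (pvHasKey config "monitoring" || pvHasKey config "prometheus" ||
        pvHasKey config "grafana") = true
    · simp only [Bool.or_eq_true, List.any_cons, List.any_nil, Bool.or_false] at h3 ⊢
      simp [h0, h1, hdb, hrd, hch, hpg, h3, pvLookup?, pvNames]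
    · simp only [Bool.or_eq_true, not_or, Bool.not_eq_true] at h3
      obtain ⟨⟨hmo, hpr⟩, hgr⟩ := h3
      by_cases h4 : (pvHasKey config "security" || pvHasKey config "auth") = true
      · simp only [Bool.or_eq_true, List.any_cons, List.any_nil, Bool.or_false] at h4 ⊢
        simp [h0, h1, hdb, hrd, hch, hpg, hmo, hpr, hgr, h4, pvLookup?, pvNames]
      · simp only [Bool.or_eq_true, not_or, Bool.not_eq_true] at h4
        obtain ⟨hse, hau⟩ := h4
        simp [h0, h1, hdb, hrd, hch, hpg, hmo, hpr, hgr, hse, hau, pvLookup?, pvNames]
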